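-- pv_equiv track=rewrite | github.com/dev-quitcode/Project-Automatron | orchestrator/orchestrator/graph/nodes/reviewer.py | _looks_successful
-- ===== SOURCE A (Python) =====
-- def _looks_successful(output: str) -> bool:
--     output_lower = output.lower()
--     error_indicators = [
--         "error:",
--         "error!",
--         "failed",
--         "exception",
--         "traceback",
--         "fatal",
--         "cannot find",
--         "not found",
--         "permission denied",
--         "enoent",
--         "eacces",
--     ]
--     return not any(indicator in output_lower for indicator in error_indicators)
-- ===== SOURCE B (Python) =====
-- _ERROR_INDICATORS = [
--     "error:",
--     "error!",
--     "failed",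
--     "exception",
--     "traceback",
--     "fatal",
--     "cannot find",
--     "not found",
--     "permission denied",
--     "enoent",
--     "eacces",
-- ]
--
--
-- def _build_trie(words):
--     """Prefix trie of the indicator words; '' key marks a word's end."""
--     root = {}
--     for w in words:
--         node = root
--         for ch in w:
--             node = node.setdefault(ch, {})
--         node[""] = True
--     return root
--
--
-- _TRIE = _build_trie(_ERROR_INDICATORS)
--
--
-- def _match_here(node, s, j):
--     """Does some trie word start at position j of s?"""
--     if "" in node:
--         return True
--     if j < len(s) and s[j] in node:
--         return _match_here(node[s[j]], s, j + 1)
--     return False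
--
--
-- def _looks_successful(output: str) -> bool:
--     s = output.lower()
--     return not any(_match_here(_TRIE, s, i) for i in range(len(s) + 1))
-- ===== Notes on version B (the rewrite author's own statement) =====
-- stated objective: alternative
-- what changed: Replaces the pattern-major loop of independent substring searches with a prefix trie of the indicators built once and a single position-major scan that walks the trie at each position, so common indicator prefixes (e.g. 'error:'/'error!') are tested once and the per-pattern inner search disappears.
import Mathlib
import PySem

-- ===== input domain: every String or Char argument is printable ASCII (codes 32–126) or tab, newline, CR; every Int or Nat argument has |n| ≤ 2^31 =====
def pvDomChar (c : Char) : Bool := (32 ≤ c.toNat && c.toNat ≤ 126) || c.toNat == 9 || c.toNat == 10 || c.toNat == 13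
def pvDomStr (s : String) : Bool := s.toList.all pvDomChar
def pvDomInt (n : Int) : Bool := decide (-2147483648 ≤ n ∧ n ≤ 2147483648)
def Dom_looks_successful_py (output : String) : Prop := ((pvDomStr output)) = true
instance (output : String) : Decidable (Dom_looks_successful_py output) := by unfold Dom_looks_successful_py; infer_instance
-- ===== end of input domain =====

-- B replaces A's pattern-major loop of library substring searches by a prefix trie of
-- the indicators built once and one position-major scan walking the trie (alternative).

-- ===== PORT A =====
-- literal transliteration: lowercase once, then `not any(indicator in output_lower …)`
def looks_successful_py (output : String) : Bool :=
  let output_lower := PySem.Str.lower output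
  let error_indicators : List String :=
    ["error:", "error!", "failed", "exception", "traceback", "fatal",
     "cannot find", "not found", "permission denied", "enoent", "eacces"]
  !(error_indicators.any (fun indicator => PySem.Str.isIn indicator output_lower))

-- ===== PORT B =====
-- trie node: terminal flag + edge list (mutual pair; Python: dict with "" terminal key)
mutual
inductive PTrie where
  | node : Bool → PEdges → PTrie
deriving Repr
inductive PEdges where
  | nil : PEdges
  | cons : Char → PTrie → PEdges → PEdges
deriving Repr
end

-- dict lookup node[c]
def pvLookup : PEdges → Char → Option PTrie
  | .nil, _ => none
  | .cons d u es, c => if c = d then some u else pvLookup es c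

-- replace the c-child (or append it, like setdefault inserting at the end)
def pvSetChild : PEdges → Char → PTrie → PEdges
  | .nil, c, u => .cons c u .nil
  | .cons d v es, c, u => if c = d then .cons d u es else .cons d v (pvSetChild es c u)

-- the inner loop of _build_trie for one word (node.setdefault walk, then node[""] = True)
def pvInsert : PTrie → List Char → PTrie
  | .node _ es, [] => .node true es
  | .node b es, c :: w =>
      .node b (pvSetChild es c (pvInsert ((pvLookup es c).getD (.node false .nil)) w))

def pvErrorIndicators : List String :=
  ["error:", "error!", "failed", "exception", "traceback", "fatal",
   "cannot find", "not found", "permission denied", "enoent", "eacces"]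

-- _TRIE = _build_trie(_ERROR_INDICATORS)
def pvTrie : PTrie :=
  pvErrorIndicators.foldl (fun t w => pvInsert t w.toList) (.node false .nil)

-- _match_here(node, s, j) on the suffix s[j:]
def pvMatchHere : PTrie → List Char → Bool
  | .node b _, [] => b
  | .node b es, c :: s =>
      b || (match pvLookup es c with
            | some u => pvMatchHere u s
            | none => false)

-- any(_match_here(_TRIE, s, i) for i in range(len(s)+1)): scan positions left to right
def pvAnyPos (t : PTrie) : List Char → Bool
  | [] => pvMatchHere t []
  | c :: s => pvMatchHere t (c :: s) || pvAnyPos t s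

def looks_successful_py_alt (output : String) : Bool :=
  !(pvAnyPos pvTrie (PySem.Str.lower output).toList)

-- ===== PRECONDITION & SPEC =====
def Spec_looks_successful_py (output : String) (out : Bool) : Prop := out = looks_successful_py_alt output
instance (output : String) (out : Bool) : Decidable (Spec_looks_successful_py output out) := by unfold Spec_looks_successful_py; infer_instance

-- ===== CLAIM =====
def Claim_equal_looks_successful_py : Prop := ∀ (output : String), Dom_looks_successful_py output → Spec_looks_successful_py output (looks_successful_py output)

-- ===== LEMMAS AND PROOFS =====

theorem pv_lookup_set (es : PEdges) (c d : Char) (u : PTrie) :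
    pvLookup (pvSetChild es c u) d = if d = c then some u else pvLookup es d := by
  cases es with
  | nil => by_cases h : d = c <;> simp [pvSetChild, pvLookup, h]
  | cons e v es =>
      simp only [pvSetChild]
      by_cases h : c = e
      · subst h; by_cases hd : d = c <;> simp [pvLookup, hd]
      · rw [if_neg h]
        by_cases hd : d = e
        · subst hd
          have hdc : ¬ d = c := fun hh => h hh.symm
          simp [pvLookup, hdc]
        · simp [pvLookup, hd, pv_lookup_set es c d u]

theorem pv_match_leaf (s : List Char) : pvMatchHere (.node false .nil) s = false := by
  cases s <;> simp [pvMatchHere, pvLookup]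

theorem pv_match_insert (w : List Char) (t : PTrie) (s : List Char) :
    pvMatchHere (pvInsert t w) s = (decide (w <+: s) || pvMatchHere t s) := by
  induction w generalizing t s with
  | nil =>
      obtain ⟨b, es⟩ := t
      cases s <;> simp [pvInsert, pvMatchHere]
  | cons c w ih =>
      obtain ⟨b, es⟩ := t
      cases s with
      | nil => simp [pvInsert, pvMatchHere]
      | cons d s' =>
          simp only [pvInsert, pvMatchHere, pv_lookup_set]
          by_cases hd : d = c
          · subst hd
            rw [if_pos rfl]
            cases hlk : pvLookup es d with
            | none =>
                simp [ih, pv_match_leaf, List.cons_prefix_cons, Bool.or_comm]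
            | some u =>
                simp [ih, List.cons_prefix_cons]
                cases decide (w <+: s') <;> cases b <;> cases pvMatchHere u s' <;> simp
          · rw [if_neg hd]
            have hpre : (decide ((c :: w) <+: (d :: s'))) = false := by
              simp only [List.cons_prefix_cons, decide_eq_false_iff_not]
              rintro ⟨h1, -⟩; exact hd h1.symm
            rw [hpre]
            simp

theorem pv_match_trie (ws : List String) (t : PTrie) (s : List Char) :
    pvMatchHere (ws.foldl (fun t w => pvInsert t w.toList) t) s
      = (ws.any (fun w => decide (w.toList <+: s)) || pvMatchHere t s) := by
  induction ws generalizing t with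
  | nil => simp
  | cons w ws ih =>
      simp only [List.foldl_cons, ih, pv_match_insert, List.any_cons]
      cases decide (w.toList <+: s) <;> cases pvMatchHere t s <;> simp

theorem pv_anyPos_iff (t : PTrie) (s : List Char) :
    pvAnyPos t s = true ↔ ∃ u, u <:+ s ∧ pvMatchHere t u = true := by
  induction s with
  | nil => simp [pvAnyPos, List.suffix_nil]
  | cons c s ih =>
      simp only [pvAnyPos, Bool.or_eq_true, ih]
      constructor
      · rintro (h | ⟨u, hu, h⟩)
        · exact ⟨c :: s, List.suffix_refl _, h⟩
        · exact ⟨u, hu.trans (List.suffix_cons c s), h⟩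
      · rintro ⟨u, hu, h⟩
        rcases (List.suffix_cons_iff.mp hu) with heq | hu'
        · subst heq; exact Or.inl h
        · exact Or.inr ⟨u, hu', h⟩

theorem pv_scan_eq (s : List Char) :
    pvAnyPos pvTrie s = pvErrorIndicators.any (fun w => PySem.Chars.isIn w.toList s) := by
  rw [Bool.eq_iff_iff, pv_anyPos_iff]
  simp only [pvTrie, pv_match_trie, pv_match_leaf, Bool.or_false, List.any_eq_true,
    decide_eq_true_eq, PySem.Chars.isIn_iff_infix]
  constructor
  · rintro ⟨u, hu, w, hw, hpre⟩
    exact ⟨w, hw, List.infix_iff_prefix_suffix.mpr ⟨u, hpre, hu⟩⟩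
  · rintro ⟨w, hw, hinf⟩
    obtain ⟨u, hpre, hu⟩ := List.infix_iff_prefix_suffix.mp hinf
    exact ⟨u, hu, w, hw, hpre⟩

-- ===== VERDICT =====
theorem looks_successful_py_spec : Claim_equal_looks_successful_py := by
  intro output _
  unfold Spec_looks_successful_py looks_successful_py looks_successful_py_alt
  rw [pv_scan_eq]
  simp [pvErrorIndicators, PySem.Str.isIn_eq]
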